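-- pv_equiv track=rewrite | github.com/Ocedy16/Tetris_game | Main code.py | creer_grille
-- ===== SOURCE A (Python) =====
-- def creer_grille(grille_finie):# liste des blocs avec tuple = couleur et indice du tuple = coordonnées
--     grille = [[(0, 0, 0) for x in range(10)] for y in
--               range(20)]  # Reinitialisation de la grille. Le tuple indique la couleur
--
--     # Ici le but est d'afficher la grille en fonction des informations stockées.
--     for i in range(len(grille)):
--         for j in range(len(grille[i])):
--             if (j, i) in grille_finie:
--                 c = grille_finie[(j, i)]
--                 grille[i][j] = c
--     return grille
-- ===== SOURCE B (Python) =====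
-- def creer_grille(grille_finie):
--     grille = [[(0, 0, 0) for x in range(10)] for y in range(20)]
--     # One pass over the dict entries instead of scanning all 200 cells.
--     for (x, y), c in grille_finie.items():
--         if 0 <= x < 10 and 0 <= y < 20:
--             grille[y][x] = c
--     return grille
-- ===== Notes on version B (the rewrite author's own statement) =====
-- stated objective: alternative
-- what changed: Instead of scanning all 200 grid cells and testing dict membership for each, B fills the blank grid and then makes a single pass over the dict's items, writing each in-bounds coordinate directly into the grid.
import Mathlib
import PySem

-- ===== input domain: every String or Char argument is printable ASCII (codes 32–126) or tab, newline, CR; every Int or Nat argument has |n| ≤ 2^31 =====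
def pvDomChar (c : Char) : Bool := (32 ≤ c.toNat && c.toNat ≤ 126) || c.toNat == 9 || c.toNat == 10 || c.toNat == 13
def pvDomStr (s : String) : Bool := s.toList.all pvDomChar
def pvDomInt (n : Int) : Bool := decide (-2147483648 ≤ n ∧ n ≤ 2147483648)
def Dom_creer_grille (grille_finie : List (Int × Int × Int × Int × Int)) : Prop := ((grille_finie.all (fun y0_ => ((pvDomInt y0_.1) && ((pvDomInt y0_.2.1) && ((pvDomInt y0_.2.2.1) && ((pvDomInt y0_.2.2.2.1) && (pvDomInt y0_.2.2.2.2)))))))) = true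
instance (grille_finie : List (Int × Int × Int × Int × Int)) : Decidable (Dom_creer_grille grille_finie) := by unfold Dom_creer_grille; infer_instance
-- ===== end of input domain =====

-- B replaces A's scan of all 200 cells (one dict-membership test per cell) by a single pass over the
-- dict's items, writing each in-bounds coordinate into the blank grid (objective: alternative).


-- ===== PORT A =====
-- dict lookup, first match (an entry (x, y, r, g, b) is key (x, y) ↦ value (r, g, b));
-- `(j, i) in grille_finie` is `(pvLook … ).isSome`, `grille_finie[(j, i)]` its value
def pvLook (l : List (Int × Int × Int × Int × Int)) (k : Int × Int) : Option (Int × Int × Int) :=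
  match l with
  | [] => none
  | (x, y, r, g, b) :: t => if x = k.1 ∧ y = k.2 then some (r, g, b) else pvLook t k

-- the 20×10 comprehension of (0,0,0) both sources start with
def pvInit : List (List (Int × Int × Int)) :=
  (List.range 20).map (fun _ => (List.range 10).map (fun _ => ((0 : Int), (0 : Int), (0 : Int))))

-- the assignment grille[i][j] = c (row index first, as in both sources)
def pvSetCell (g : List (List (Int × Int × Int))) (i j : Nat) (c : Int × Int × Int) :
    List (List (Int × Int × Int)) :=
  g.set i ((g.getD i []).set j c)

def creer_grille (grille_finie : List (Int × Int × Int × Int × Int)) : List (List (Int × Int × Int)) :=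
  (List.range pvInit.length).foldl (fun g (i : Nat) =>
    (List.range (g.getD i []).length).foldl (fun g2 (j : Nat) =>
      match pvLook grille_finie ((j : Int), (i : Int)) with
      | some c => pvSetCell g2 i j c
      | none => g2) g) pvInit

-- ===== PORT B =====
def creer_grille_alt (grille_finie : List (Int × Int × Int × Int × Int)) : List (List (Int × Int × Int)) :=
  grille_finie.foldl (fun g e =>
    match e with
    | (x, y, r, gr, b) =>
      if 0 ≤ x ∧ x < 10 ∧ 0 ≤ y ∧ y < 20 then pvSetCell g y.toNat x.toNat (r, gr, b)
      else g) pvInit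

-- ===== PRECONDITION & SPEC =====
-- Pre_ excludes association lists with duplicate (x, y) keys: such lists cannot arise from a
-- Python dict (a dict's keys are unique), and on them first-match (A) vs last-write (B) is accidental.
def Pre_creer_grille (grille_finie : List (Int × Int × Int × Int × Int)) : Prop :=
  (grille_finie.map (fun e => (e.1, e.2.1))).Nodup
instance (grille_finie : List (Int × Int × Int × Int × Int)) : Decidable (Pre_creer_grille grille_finie) := by unfold Pre_creer_grille; infer_instance

def pvWitness_creer_grille : (List (Int × Int × Int × Int × Int)) :=
  [(0, 0, 255, 0, 0), (3, 19, 0, 255, 0), (-1, 5, 1, 2, 3)]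

def Spec_creer_grille (grille_finie : List (Int × Int × Int × Int × Int)) (out : List (List (Int × Int × Int))) : Prop := out = creer_grille_alt grille_finie
instance (grille_finie : List (Int × Int × Int × Int × Int)) (out : List (List (Int × Int × Int))) : Decidable (Spec_creer_grille grille_finie out) := by unfold Spec_creer_grille; infer_instance

-- ===== CLAIM (what is proved, stated in full; the proofs are below) =====
def Claim_equal_creer_grille : Prop := ∀ (grille_finie : List (Int × Int × Int × Int × Int)), Dom_creer_grille grille_finie → Pre_creer_grille grille_finie → Spec_creer_grille grille_finie (creer_grille grille_finie)

-- ===== LEMMAS AND PROOFS =====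

-- last-match lookup: what B's overwriting single pass realises
def pvLookLast (l : List (Int × Int × Int × Int × Int)) (k : Int × Int) : Option (Int × Int × Int) :=
  match l with
  | [] => none
  | (x, y, r, g, b) :: t =>
    match pvLookLast t k with
    | some c => some c
    | none => if x = k.1 ∧ y = k.2 then some (r, g, b) else none

lemma pvLookLast_cons (x y r g b : Int) (t : List (Int × Int × Int × Int × Int)) (k : Int × Int) :
    pvLookLast ((x, y, r, g, b) :: t) k =
      match pvLookLast t k with
      | some c => some c
      | none => if x = k.1 ∧ y = k.2 then some (r, g, b) else none := rfl

def pvCell (g : List (List (Int × Int × Int))) (i j : Nat) : Int × Int × Int :=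
  (g.getD i []).getD j (0, 0, 0)

def GoodShape (g : List (List (Int × Int × Int))) : Prop :=
  g.length = 20 ∧ ∀ r ∈ g, r.length = 10

-- A's two loops, named for the induction
def pvInnerA (l : List (Int × Int × Int × Int × Int)) (i : Nat)
    (g : List (List (Int × Int × Int))) (n : Nat) : List (List (Int × Int × Int)) :=
  (List.range n).foldl (fun g2 (j : Nat) =>
    match pvLook l ((j : Int), (i : Int)) with
    | some c => pvSetCell g2 i j c
    | none => g2) g

def pvOuterA (l : List (Int × Int × Int × Int × Int))
    (g : List (List (Int × Int × Int))) (n : Nat) : List (List (Int × Int × Int)) :=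
  (List.range n).foldl (fun g (i : Nat) => pvInnerA l i g ((g.getD i []).length)) g

-- B's loop body, named for the induction
def pvBodyB (g : List (List (Int × Int × Int))) (e : Int × Int × Int × Int × Int) :
    List (List (Int × Int × Int)) :=
  match e with
  | (x, y, r, gr, b) =>
    if 0 ≤ x ∧ x < 10 ∧ 0 ≤ y ∧ y < 20 then pvSetCell g y.toNat x.toNat (r, gr, b)
    else g

lemma lenInit : pvInit.length = 20 := by simp [pvInit]

lemma creer_grille_eq (l : List (Int × Int × Int × Int × Int)) :
    creer_grille l = pvOuterA l pvInit 20 := by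
  unfold creer_grille pvOuterA pvInnerA
  rw [lenInit]

lemma alt_eq (l : List (Int × Int × Int × Int × Int)) :
    creer_grille_alt l = l.foldl pvBodyB pvInit := rfl

lemma shape_init : GoodShape pvInit := by
  constructor <;> simp [pvInit]

lemma rowlen {g : List (List (Int × Int × Int))} (hs : GoodShape g) {i : Nat} (hi : i < 20) :
    (g.getD i []).length = 10 := by
  have h20 := hs.1
  have hlen : i < g.length := by omega
  rw [List.getD_eq_getElem _ _ hlen]
  exact hs.2 _ (List.getElem_mem hlen)

lemma shape_setCell {g : List (List (Int × Int × Int))} (hs : GoodShape g) (i j : Nat)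
    (c : Int × Int × Int) : GoodShape (pvSetCell g i j c) := by
  have h20 := hs.1
  by_cases hi : i < g.length
  · refine ⟨by simp [pvSetCell, hs.1], ?_⟩
    intro r hr
    rcases List.mem_or_eq_of_mem_set hr with h | h
    · exact hs.2 _ h
    · subst h
      rw [List.length_set, rowlen hs (by omega)]
  · unfold pvSetCell
    rw [List.set_eq_of_length_le (by omega)]
    exact hs

lemma cell_setCell_same {g : List (List (Int × Int × Int))} (hs : GoodShape g) {i j : Nat}
    (hi : i < 20) (hj : j < 10) (c : Int × Int × Int) :
    pvCell (pvSetCell g i j c) i j = c := by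
  have h20 := hs.1
  have hlen : i < g.length := by omega
  have hrow : j < (g.getD i []).length := by rw [rowlen hs hi]; exact hj
  unfold pvCell pvSetCell
  rw [show (g.set i ((g.getD i []).set j c)).getD i [] = (g.getD i []).set j c by
    simp [List.getD_eq_getElem?_getD, hlen]]
  rw [List.getD_eq_getElem?_getD] at hrow
  simp [List.getD_eq_getElem?_getD, hrow]

lemma cell_setCell_other {g : List (List (Int × Int × Int))} {i j i' j' : Nat}
    (h : i ≠ i' ∨ j ≠ j') (c : Int × Int × Int) :
    pvCell (pvSetCell g i j c) i' j' = pvCell g i' j' := by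
  unfold pvCell pvSetCell
  rcases h with h | h
  · rw [show (g.set i ((g.getD i []).set j c)).getD i' [] = g.getD i' [] by
      simp [List.getD_eq_getElem?_getD, List.getElem?_set_ne h]]
  · by_cases hi : i < g.length
    · by_cases hii : i = i'
      · subst hii
        rw [show (g.set i ((g.getD i []).set j c)).getD i [] = (g.getD i []).set j c by
          simp [List.getD_eq_getElem?_getD, hi]]
        simp [List.getD_eq_getElem?_getD, List.getElem?_set_ne h]
      · rw [show (g.set i ((g.getD i []).set j c)).getD i' [] = g.getD i' [] by
          simp [List.getD_eq_getElem?_getD, List.getElem?_set_ne hii]]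
    · rw [List.set_eq_of_length_le (by omega)]

-- ==== A-side characterisation ====

lemma innerA_succ (l : List (Int × Int × Int × Int × Int)) (i n : Nat)
    (g : List (List (Int × Int × Int))) :
    pvInnerA l i g (n + 1) =
      (match pvLook l ((n : Int), (i : Int)) with
       | some c => pvSetCell (pvInnerA l i g n) i n c
       | none => pvInnerA l i g n) := by
  unfold pvInnerA
  rw [List.range_succ, List.foldl_append]
  rfl

lemma innerA_shape {g : List (List (Int × Int × Int))} (hs : GoodShape g)
    (l : List (Int × Int × Int × Int × Int)) (i n : Nat) :
    GoodShape (pvInnerA l i g n) := by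
  induction n with
  | zero => exact hs
  | succ n ih =>
    rw [innerA_succ]
    cases pvLook l ((n : Int), (i : Int)) with
    | none => exact ih
    | some c => exact shape_setCell ih i n c

lemma innerA_cell {g : List (List (Int × Int × Int))} (hs : GoodShape g)
    (l : List (Int × Int × Int × Int × Int)) {i n : Nat} (hi : i < 20) (hn : n ≤ 10)
    {i' j' : Nat} (hi' : i' < 20) (hj' : j' < 10) :
    pvCell (pvInnerA l i g n) i' j' =
      if i' = i ∧ j' < n then (pvLook l ((j' : Int), (i' : Int))).getD (pvCell g i' j')
      else pvCell g i' j' := by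
  induction n with
  | zero => simp [pvInnerA]
  | succ n ih =>
    have hn' : n ≤ 10 := by omega
    rw [innerA_succ]
    by_cases hij : i' = i ∧ j' = n
    · obtain ⟨h1, h2⟩ := hij
      subst h1; subst h2
      cases hc : pvLook l ((j' : Int), (i' : Int)) with
      | none =>
        rw [ih hn']
        rw [if_neg (by omega : ¬ (i' = i' ∧ j' < j')),
          if_pos ⟨rfl, by omega⟩]
        rfl
      | some c =>
        rw [cell_setCell_same (innerA_shape hs l i' j') hi (by omega) c,
          if_pos ⟨rfl, by omega⟩]
        rfl
    · have hne : i ≠ i' ∨ n ≠ j' := by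
        by_contra hcon
        push_neg at hcon
        exact hij ⟨hcon.1.symm, hcon.2.symm⟩
      have hstep :
          pvCell (match pvLook l ((n : Int), (i : Int)) with
            | some c => pvSetCell (pvInnerA l i g n) i n c
            | none => pvInnerA l i g n) i' j' = pvCell (pvInnerA l i g n) i' j' := by
        cases pvLook l ((n : Int), (i : Int)) with
        | none => rfl
        | some c => exact cell_setCell_other hne c
      rw [hstep, ih hn']
      by_cases hc : i' = i ∧ j' < n
      · rw [if_pos hc, if_pos ⟨hc.1, by omega⟩]
      · have hc' : ¬ (i' = i ∧ j' < n + 1) := by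
          rintro ⟨ha, hb⟩
          rcases Nat.lt_succ_iff_lt_or_eq.mp hb with hlt | heq
          · exact hc ⟨ha, hlt⟩
          · exact hij ⟨ha, heq⟩
        rw [if_neg hc, if_neg hc']

lemma outerA_succ (l : List (Int × Int × Int × Int × Int)) (n : Nat)
    (g : List (List (Int × Int × Int))) :
    pvOuterA l g (n + 1) =
      pvInnerA l n (pvOuterA l g n) (((pvOuterA l g n).getD n []).length) := by
  unfold pvOuterA
  rw [List.range_succ, List.foldl_append]
  rfl

lemma outerA_shape {g : List (List (Int × Int × Int))} (hs : GoodShape g)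
    (l : List (Int × Int × Int × Int × Int)) (n : Nat) :
    GoodShape (pvOuterA l g n) := by
  induction n with
  | zero => exact hs
  | succ n ih =>
    rw [outerA_succ]
    exact innerA_shape ih l n _

lemma outerA_cell {g : List (List (Int × Int × Int))} (hs : GoodShape g)
    (l : List (Int × Int × Int × Int × Int)) {n : Nat} (hn : n ≤ 20)
    {i' j' : Nat} (hi' : i' < 20) (hj' : j' < 10) :
    pvCell (pvOuterA l g n) i' j' =
      if i' < n then (pvLook l ((j' : Int), (i' : Int))).getD (pvCell g i' j')
      else pvCell g i' j' := by
  induction n with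
  | zero => simp [pvOuterA]
  | succ n ih =>
    have hn' : n ≤ 20 := by omega
    have hsn := outerA_shape hs l n
    rw [outerA_succ, rowlen hsn (by omega),
      innerA_cell hsn l (by omega) (by omega) hi' hj', ih hn']
    by_cases h1 : i' = n
    · subst h1
      rw [if_pos ⟨rfl, hj'⟩, if_neg (by omega : ¬ i' < i'), if_pos (by omega)]
    · rw [if_neg (fun hc => h1 hc.1)]
      by_cases h2 : i' < n
      · rw [if_pos h2, if_pos (by omega)]
      · rw [if_neg h2, if_neg (by omega)]

-- ==== B-side characterisation ====

lemma shape_bodyB {g : List (List (Int × Int × Int))} (hs : GoodShape g)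
    (e : Int × Int × Int × Int × Int) : GoodShape (pvBodyB g e) := by
  obtain ⟨x, y, r, gr, b⟩ := e
  simp only [pvBodyB]
  split_ifs with h
  · exact shape_setCell hs _ _ _
  · exact hs

lemma foldB_shape (l : List (Int × Int × Int × Int × Int)) :
    ∀ (g : List (List (Int × Int × Int))), GoodShape g → GoodShape (l.foldl pvBodyB g) := by
  induction l with
  | nil => intro g hg; exact hg
  | cons e t ih => intro g hg; exact ih _ (shape_bodyB hg e)

lemma foldB_cell (l : List (Int × Int × Int × Int × Int)) :
    ∀ (g : List (List (Int × Int × Int))), GoodShape g → ∀ {i j : Nat}, i < 20 → j < 10 →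
    pvCell (l.foldl pvBodyB g) i j =
      (pvLookLast l ((j : Int), (i : Int))).getD (pvCell g i j) := by
  induction l with
  | nil => intro g _ i j _ _; simp [pvLookLast]
  | cons e t ih =>
    intro g hs i j hi hj
    obtain ⟨x, y, r, gr, b⟩ := e
    rw [List.foldl_cons, ih _ (shape_bodyB hs _) hi hj, pvLookLast_cons]
    cases hlt : pvLookLast t ((j : Int), (i : Int)) with
    | some c => rfl
    | none =>
      simp only [Option.getD_none]
      by_cases hk : x = ((j : Nat) : Int) ∧ y = ((i : Nat) : Int)
      · obtain ⟨hx, hy⟩ := hk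
        subst hx; subst hy
        have hg : (0:Int) ≤ (j:Int) ∧ (j:Int) < 10 ∧ (0:Int) ≤ (i:Int) ∧ (i:Int) < 20 :=
          ⟨Int.natCast_nonneg j, by exact_mod_cast hj, Int.natCast_nonneg i, by exact_mod_cast hi⟩
        rw [if_pos ⟨rfl, rfl⟩]
        simp only [pvBodyB, if_pos hg, Int.toNat_natCast]
        rw [cell_setCell_same hs hi hj]
        rfl
      · have hcell : pvCell (pvBodyB g (x, y, r, gr, b)) i j = pvCell g i j := by
          simp only [pvBodyB]
          split_ifs with hgd
          · refine cell_setCell_other ?_ _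
            by_contra hcon
            push_neg at hcon
            apply hk
            constructor
            · rw [← hcon.2, Int.toNat_of_nonneg hgd.1]
            · rw [← hcon.1, Int.toNat_of_nonneg hgd.2.2.1]
          · rfl
        rw [hcell, if_neg hk]
        rfl

-- ==== first match = last match under distinct keys ====

lemma lookLast_none_of_not_mem (l : List (Int × Int × Int × Int × Int)) (k : Int × Int)
    (h : k ∉ l.map (fun e => (e.1, e.2.1))) : pvLookLast l k = none := by
  induction l with
  | nil => rfl
  | cons e t ih =>
    obtain ⟨x, y, r, gr, b⟩ := e
    simp only [List.map_cons, List.mem_cons, not_or] at h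
    rw [pvLookLast_cons, ih h.2]
    have hne : ¬ (x = k.1 ∧ y = k.2) := by
      intro hc
      exact h.1 (by simp [hc.1, hc.2])
    simp [hne]

lemma look_eq_lookLast (l : List (Int × Int × Int × Int × Int))
    (h : (l.map (fun e => (e.1, e.2.1))).Nodup) (k : Int × Int) :
    pvLook l k = pvLookLast l k := by
  induction l with
  | nil => rfl
  | cons e t ih =>
    obtain ⟨x, y, r, gr, b⟩ := e
    simp only [List.map_cons, List.nodup_cons] at h
    rw [pvLookLast_cons]
    show (if x = k.1 ∧ y = k.2 then some (r, gr, b) else pvLook t k) = _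
    by_cases hk : x = k.1 ∧ y = k.2
    · have hnm : k ∉ t.map (fun e => (e.1, e.2.1)) := by
        have hxy : (x, y) = k := Prod.ext hk.1 hk.2
        rw [← hxy]
        exact h.1
      rw [lookLast_none_of_not_mem t k hnm]
      simp [hk]
    · rw [ih h.2]
      cases pvLookLast t k with
      | some c => simp [hk]
      | none => simp [hk]

-- ==== grid extensionality ====

lemma getElem_eq_cell {g : List (List (Int × Int × Int))} {i j : Nat}
    (hi : i < g.length) (hj : j < (g[i]).length) :
    g[i][j] = pvCell g i j := by
  unfold pvCell
  rw [List.getD_eq_getElem _ _ hi, List.getD_eq_getElem _ _ hj]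

lemma grid_ext {g1 g2 : List (List (Int × Int × Int))} (h1 : GoodShape g1) (h2 : GoodShape g2)
    (h : ∀ i j : Nat, i < 20 → j < 10 → pvCell g1 i j = pvCell g2 i j) : g1 = g2 := by
  have h1l := h1.1
  apply List.ext_getElem (by rw [h1.1, h2.1])
  intro i hi1 hi2
  have hi : i < 20 := by omega
  have hr1 : (g1[i]).length = 10 := h1.2 _ (List.getElem_mem hi1)
  have hr2 : (g2[i]).length = 10 := h2.2 _ (List.getElem_mem hi2)
  apply List.ext_getElem (by rw [hr1, hr2])
  intro j hj1 hj2
  have hj : j < 10 := by rw [hr1] at hj1; omega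
  rw [getElem_eq_cell hi1 hj1, getElem_eq_cell hi2 hj2]
  exact h i j hi hj

-- ===== VERDICT (by name: the statement is the Claim_ definition above) =====
theorem creer_grille_spec : Claim_equal_creer_grille := by
  intro l _ hpre
  show creer_grille l = creer_grille_alt l
  rw [creer_grille_eq, alt_eq]
  apply grid_ext (outerA_shape shape_init l 20) (foldB_shape l pvInit shape_init)
  intro i j hi hj
  rw [outerA_cell shape_init l (by omega) hi hj, foldB_cell l pvInit shape_init hi hj,
    look_eq_lookLast l hpre]
  rw [if_pos hi]
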